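-- pv_equiv track=rewrite | github.com/amandhillon22/chatbot-streamlit | intelligent_reasoning.py | get_mandatory_joins_for_query
-- ===== SOURCE A (Python) =====
-- def get_mandatory_joins_for_query(query_lower):
--     """
--     Return the mandatory JOIN statements needed for a hierarchical query.
--     This ensures no relationships are missed.
--     """
--     mandatory_joins = []
--
--     # Analyze what entities are mentioned to determine required joins
--     entities_mentioned = {
--         'vehicle': any(word in query_lower for word in ['vehicle', 'truck', 'bus', 'fleet', 'reg_no']),
--         'plant': any(word in query_lower for word in ['plant', 'facility', 'hosp']),
--         'region': any(word in query_lower for word in ['region', 'district']),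
--         'zone': any(word in query_lower for word in ['zone'])
--     }
--
--     # Build the join chain based on what's needed
--     if entities_mentioned['vehicle']:
--         # Vehicle is mentioned, start from vehicle_master
--         base_table = 'vehicle_master vm'
--
--         if entities_mentioned['plant']:
--             mandatory_joins.append('LEFT JOIN hosp_master hm ON vm.id_hosp = hm.id_no')
--
--             if entities_mentioned['region']:
--                 mandatory_joins.append('LEFT JOIN district_master dm ON hm.id_dist = dm.id_no')
--
--                 if entities_mentioned['zone']:
--                     mandatory_joins.append('LEFT JOIN zone_master zm ON dm.id_zone = zm.id_no')
--
--     elif entities_mentioned['plant']: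
--         # Plant is mentioned, start from hosp_master
--         base_table = 'hosp_master hm'
--
--         if entities_mentioned['region']:
--             mandatory_joins.append('LEFT JOIN district_master dm ON hm.id_dist = dm.id_no')
--
--             if entities_mentioned['zone']:
--                 mandatory_joins.append('LEFT JOIN zone_master zm ON dm.id_zone = zm.id_no')
--
--     elif entities_mentioned['region']:
--         # Region is mentioned, start from district_master
--         base_table = 'district_master dm'
--
--         if entities_mentioned['zone']:
--             mandatory_joins.append('LEFT JOIN zone_master zm ON dm.id_zone = zm.id_no')
--
--     else:
--         # Default to zone_master if only zone is mentioned
--         base_table = 'zone_master zm'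
--
--     return base_table, mandatory_joins
-- ===== SOURCE B (Python) =====
-- _LEVELS = [
--     ('vehicle', 'vehicle_master vm', None),
--     ('plant', 'hosp_master hm', 'LEFT JOIN hosp_master hm ON vm.id_hosp = hm.id_no'),
--     ('region', 'district_master dm', 'LEFT JOIN district_master dm ON hm.id_dist = dm.id_no'),
--     ('zone', 'zone_master zm', 'LEFT JOIN zone_master zm ON dm.id_zone = zm.id_no'),
-- ]
-- _KEYWORDS = {
--     'vehicle': ['vehicle', 'truck', 'bus', 'fleet', 'reg_no'],
--     'plant': ['plant', 'facility', 'hosp'],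
--     'region': ['region', 'district'],
--     'zone': ['zone'],
-- }
--
-- def get_mandatory_joins_for_query(query_lower):
--     present = [any(w in query_lower for w in _KEYWORDS[key]) for key, _, _ in _LEVELS]
--     i = next((k for k, p in enumerate(present) if p), len(_LEVELS) - 1)
--     base_table = _LEVELS[i][1]
--     joins = []
--     for j in range(i + 1, len(_LEVELS)):
--         if not present[j]:
--             break
--         joins.append(_LEVELS[j][2])
--     return base_table, joins
-- ===== Notes on version B (the rewrite author's own statement) =====
-- stated objective: simpler
-- what changed: Replaced A's three-deep nested if/elif chain with a constant ordered table of hierarchy levels: pick the first level whose keywords match (defaulting to zone) and collect join clauses down the chain until the first absent entity.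
import Mathlib
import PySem

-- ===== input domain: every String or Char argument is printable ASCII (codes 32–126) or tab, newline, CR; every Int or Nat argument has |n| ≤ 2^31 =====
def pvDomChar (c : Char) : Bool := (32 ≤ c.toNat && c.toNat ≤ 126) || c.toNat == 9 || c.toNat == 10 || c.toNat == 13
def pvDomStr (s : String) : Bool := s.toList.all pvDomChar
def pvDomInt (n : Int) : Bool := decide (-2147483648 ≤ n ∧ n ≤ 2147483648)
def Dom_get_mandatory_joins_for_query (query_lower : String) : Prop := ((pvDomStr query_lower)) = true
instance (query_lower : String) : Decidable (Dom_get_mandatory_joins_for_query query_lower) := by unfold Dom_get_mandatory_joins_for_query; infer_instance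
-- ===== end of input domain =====

-- B re-decomposes A's nested-if join chain into a loop over a constant table of hierarchy levels; objective: simpler.

-- ===== PORT A =====
-- the entities_mentioned dict of A; keys are fixed literals, looked up with get?.getD
-- (every key read is present, so Python's d[k] never raises)
def pvEntities (query_lower : String) : PySem.Dict String Bool :=
  PySem.Dict.ofList
    [("vehicle", (["vehicle", "truck", "bus", "fleet", "reg_no"] : List String).any
        (fun word => PySem.Str.isIn word query_lower)),
     ("plant", (["plant", "facility", "hosp"] : List String).any
        (fun word => PySem.Str.isIn word query_lower)),
     ("region", (["region", "district"] : List String).any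
        (fun word => PySem.Str.isIn word query_lower)),
     ("zone", (["zone"] : List String).any
        (fun word => PySem.Str.isIn word query_lower))]

def get_mandatory_joins_for_query (query_lower : String) : String × List String :=
  let em := pvEntities query_lower
  if (PySem.Dict.get? em "vehicle").getD false then
    -- Vehicle is mentioned, start from vehicle_master
    let base_table := "vehicle_master vm"
    if (PySem.Dict.get? em "plant").getD false then
      let mandatory_joins := ["LEFT JOIN hosp_master hm ON vm.id_hosp = hm.id_no"]
      if (PySem.Dict.get? em "region").getD false then
        let mandatory_joins := mandatory_joins ++ ["LEFT JOIN district_master dm ON hm.id_dist = dm.id_no"]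
        if (PySem.Dict.get? em "zone").getD false then
          (base_table, mandatory_joins ++ ["LEFT JOIN zone_master zm ON dm.id_zone = zm.id_no"])
        else (base_table, mandatory_joins)
      else (base_table, mandatory_joins)
    else (base_table, [])
  else if (PySem.Dict.get? em "plant").getD false then
    -- Plant is mentioned, start from hosp_master
    let base_table := "hosp_master hm"
    if (PySem.Dict.get? em "region").getD false then
      let mandatory_joins := ["LEFT JOIN district_master dm ON hm.id_dist = dm.id_no"]
      if (PySem.Dict.get? em "zone").getD false then
        (base_table, mandatory_joins ++ ["LEFT JOIN zone_master zm ON dm.id_zone = zm.id_no"])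
      else (base_table, mandatory_joins)
    else (base_table, [])
  else if (PySem.Dict.get? em "region").getD false then
    -- Region is mentioned, start from district_master
    let base_table := "district_master dm"
    if (PySem.Dict.get? em "zone").getD false then
      (base_table, ["LEFT JOIN zone_master zm ON dm.id_zone = zm.id_no"])
    else (base_table, [])
  else
    ("zone_master zm", [])

-- ===== PORT B =====
-- the constant table of hierarchy levels: (keyword list, base table, join clause)
def pvLevels : List (List String × String × Option String) :=
  [(["vehicle", "truck", "bus", "fleet", "reg_no"], "vehicle_master vm", none),
   (["plant", "facility", "hosp"], "hosp_master hm",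
      some "LEFT JOIN hosp_master hm ON vm.id_hosp = hm.id_no"),
   (["region", "district"], "district_master dm",
      some "LEFT JOIN district_master dm ON hm.id_dist = dm.id_no"),
   (["zone"], "zone_master zm",
      some "LEFT JOIN zone_master zm ON dm.id_zone = zm.id_no")]

-- B's for-loop with break: collect join clauses while the level's entity is present
def pvTakeJoins : List (Bool × List String × String × Option String) → List String
  | [] => []
  | (b, _, _, j) :: rest => if b then j.toList ++ pvTakeJoins rest else []

def get_mandatory_joins_for_query_alt (query_lower : String) : String × List String :=
  let present := pvLevels.map (fun lvl => lvl.1.any (fun w => PySem.Str.isIn w query_lower))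
  let i := (present.findIdx? id).getD (pvLevels.length - 1)
  let base_table := ((pvLevels.map (fun lvl => lvl.2.1)).getD i "")
  (base_table, pvTakeJoins ((present.zip pvLevels).drop (i + 1)))

-- ===== PRECONDITION & SPEC =====
def Spec_get_mandatory_joins_for_query (query_lower : String) (out : String × List String) : Prop := out = get_mandatory_joins_for_query_alt query_lower
instance (query_lower : String) (out : String × List String) : Decidable (Spec_get_mandatory_joins_for_query query_lower out) := by unfold Spec_get_mandatory_joins_for_query; infer_instance

-- ===== CLAIM (what is proved, stated in full; the proofs are below) =====
def Claim_equal_get_mandatory_joins_for_query : Prop := ∀ (query_lower : String), Dom_get_mandatory_joins_for_query query_lower → Spec_get_mandatory_joins_for_query query_lower (get_mandatory_joins_for_query query_lower)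

-- ===== LEMMAS AND PROOFS =====

-- ===== VERDICT (by name: the statement is the Claim_ definition above) =====
theorem get_mandatory_joins_for_query_spec : Claim_equal_get_mandatory_joins_for_query := by
  intro q _
  show _ = _
  unfold get_mandatory_joins_for_query get_mandatory_joins_for_query_alt pvEntities pvLevels
  simp only [List.map_cons, List.map_nil]
  generalize (["vehicle", "truck", "bus", "fleet", "reg_no"] : List String).any
      (fun word => PySem.Str.isIn word q) = v
  generalize (["plant", "facility", "hosp"] : List String).any
      (fun word => PySem.Str.isIn word q) = p
  generalize (["region", "district"] : List String).any
      (fun word => PySem.Str.isIn word q) = r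
  generalize (["zone"] : List String).any
      (fun word => PySem.Str.isIn word q) = z
  cases v <;> cases p <;> cases r <;> cases z <;> rfl
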